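-- pv_equiv track=rewrite | github.com/Binaryzero/legendary-rotary-phone | archive/development-versions/cve_metadata_fetcher_improved.py | parse_cvss_metrics
-- ===== SOURCE A (Python) =====
-- from typing import TYPE_CHECKING, Dict, List, Optional, Tuple, Union
--
-- def parse_cvss_metrics(vector_string: str) -> Dict[str, str]:
--     """Parse CVSS vector string into individual metrics."""
--     metrics = {}
--     if not vector_string:
--         return metrics
--
--     for part in vector_string.split('/'):
--         if ':' not in part or part.startswith('CVSS'):
--             continue
--         key, value = part.split(':', 1)
--         metrics[key] = value
--
--     return metrics
-- ===== SOURCE B (Python) =====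
-- def parse_cvss_metrics(vector_string: str) -> dict:
--     """Parse CVSS vector string into individual metrics.
--
--     Single character-scan state machine: builds key/value buffers on the fly
--     instead of splitting on '/' and then on ':'.
--     """
--     metrics = {}
--     key = []
--     val = []
--     in_val = False
--
--     def flush():
--         if in_val and not ''.join(key).startswith('CVSS'):
--             metrics[''.join(key)] = ''.join(val)
--
--     for ch in vector_string or '':
--         if ch == '/':
--             flush()
--             key, val, in_val = [], [], False
--         elif ch == ':' and not in_val:
--             in_val = True
--         elif in_val:
--             val.append(ch)
--         else:
--             key.append(ch)
--     flush()
--     return metrics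
-- ===== Notes on version B (the rewrite author's own statement) =====
-- stated objective: alternative
-- what changed: Replaces the two-level splitting loop (split on slash, then first-colon split per part) with a single character-scan state machine that accumulates key/value buffers and flushes a metric at each separator boundary.
import Mathlib
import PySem

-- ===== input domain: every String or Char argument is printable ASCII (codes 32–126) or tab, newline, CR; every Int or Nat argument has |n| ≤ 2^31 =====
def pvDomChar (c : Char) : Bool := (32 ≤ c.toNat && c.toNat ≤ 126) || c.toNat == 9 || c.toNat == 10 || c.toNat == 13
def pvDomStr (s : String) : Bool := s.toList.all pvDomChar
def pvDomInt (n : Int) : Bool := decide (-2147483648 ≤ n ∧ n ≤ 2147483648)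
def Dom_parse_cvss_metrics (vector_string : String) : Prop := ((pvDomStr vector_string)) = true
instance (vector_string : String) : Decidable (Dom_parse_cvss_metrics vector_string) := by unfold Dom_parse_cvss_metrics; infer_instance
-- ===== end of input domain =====

-- B replaces A's two-level splitting loop by a single character-scan state machine
-- (key/value buffers flushed at each separator): alternative decomposition, same cost.

-- ===== PORT A =====
-- for part in vector_string.split('/'): skip parts without ':' or starting 'CVSS';
-- key, value = part.split(':', 1); metrics[key] = value
def parse_cvss_metrics (vector_string : String) : List (String × String) :=
  let metrics : PySem.Dict String String := PySem.Dict.empty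
  if vector_string.toList = [] then metrics.items
  else
    ((PySem.Chars.splitOn vector_string.toList ['/']).foldl
      (fun (metrics : PySem.Dict String String) part =>
        if !PySem.Chars.isIn [':'] part || PySem.Chars.startswith part "CVSS".toList then
          metrics
        else
          match PySem.Chars.splitMax? part [':'] 1 with
          | some (key :: value :: _) => metrics.insert (String.ofList key) (String.ofList value)
          | _ => metrics)  -- unreachable: ':' ∈ part guarantees two pieces
      metrics).items

-- ===== PORT B =====
-- flush(): if in_val and not key.startswith('CVSS'): metrics[key] = val
def pvFlush (d : PySem.Dict String String) (key val : List Char) (inVal : Bool) :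
    PySem.Dict String String :=
  if inVal && !PySem.Chars.startswith key "CVSS".toList then
    d.insert (String.ofList key) (String.ofList val)
  else d

def pvStep (st : PySem.Dict String String × List Char × List Char × Bool) (ch : Char) :
    PySem.Dict String String × List Char × List Char × Bool :=
  let (d, key, val, inVal) := st
  if ch = '/' then (pvFlush d key val inVal, [], [], false)
  else if ch = ':' && !inVal then (d, key, val, true)
  else if inVal then (d, key, val ++ [ch], true)
  else (d, key ++ [ch], val, false)

def parse_cvss_metrics_alt (vector_string : String) : List (String × String) :=
  let st := vector_string.toList.foldl pvStep (PySem.Dict.empty, [], [], false)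
  (pvFlush st.1 st.2.1 st.2.2.1 st.2.2.2).items

-- ===== PRECONDITION & SPEC =====
def Spec_parse_cvss_metrics (vector_string : String) (out : List (String × String)) : Prop := out = parse_cvss_metrics_alt vector_string
instance (vector_string : String) (out : List (String × String)) : Decidable (Spec_parse_cvss_metrics vector_string out) := by unfold Spec_parse_cvss_metrics; infer_instance

-- ===== CLAIM (what is proved, stated in full; the proofs are below) =====
def Claim_equal_parse_cvss_metrics : Prop := ∀ (vector_string : String), Dom_parse_cvss_metrics vector_string → Spec_parse_cvss_metrics vector_string (parse_cvss_metrics vector_string)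

-- ===== LEMMAS AND PROOFS =====

-- A's loop body, on the char side
def procPart (d : PySem.Dict String String) (part : List Char) : PySem.Dict String String :=
  if !PySem.Chars.isIn [':'] part || PySem.Chars.startswith part "CVSS".toList then d
  else
    match PySem.Chars.splitMax? part [':'] 1 with
    | some (key :: value :: _) => d.insert (String.ofList key) (String.ofList value)
    | _ => d

-- reference split on '/': pre is the part accumulated so far
def mySplit (pre : List Char) : List Char → List (List Char)
  | [] => [pre]
  | c :: rest => if c = '/' then pre :: mySplit [] rest else mySplit (pre ++ [c]) rest

def partOf (k v : List Char) (b : Bool) : List Char := if b then k ++ ':' :: v else k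

lemma goSplit (fuel : Nat) : ∀ (l cur : List Char) (acc : List (List Char)),
    l.length ≤ fuel →
    PySem.Chars.splitOn.go ['/'] fuel l cur acc = acc.reverse ++ mySplit cur.reverse l := by
  induction fuel with
  | zero =>
    intro l cur acc h
    have : l = [] := List.eq_nil_of_length_eq_zero (Nat.le_zero.mp h)
    subst this
    simp [PySem.Chars.splitOn.go, mySplit]
  | succ n ih =>
    intro l cur acc h
    cases l with
    | nil => simp [PySem.Chars.splitOn.go, mySplit]
    | cons c rest =>
      simp only [PySem.Chars.splitOn.go]
      by_cases hc : c = '/'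
      · subst hc
        rw [if_pos (by simp [List.isPrefixOf])]
        rw [ih _ _ _ (by simpa using Nat.le_of_succ_le_succ h)]
        simp [mySplit]
      · rw [if_neg (by simp [List.isPrefixOf]; exact fun h' => hc h'.symm)]
        rw [ih _ _ _ (by simpa using Nat.le_of_succ_le_succ h)]
        simp [mySplit, hc]

lemma splitOn_char (cs : List Char) :
    PySem.Chars.splitOn cs ['/'] = mySplit [] cs := by
  unfold PySem.Chars.splitOn
  rw [goSplit (cs.length + 1) cs [] [] (Nat.le_succ _)]
  simp

lemma goMax_one (k : List Char) : ∀ (fuel : Nat) (v cur : List Char) (acc : List (List Char)),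
    ':' ∉ k → k.length + v.length + 1 ≤ fuel →
    PySem.Chars.splitOnMax.go [':'] fuel 1 (k ++ ':' :: v) cur acc
      = acc.reverse ++ [cur.reverse ++ k, v] := by
  induction k with
  | nil =>
    intro fuel v cur acc _ hf
    cases fuel with
    | zero => omega
    | succ n =>
      simp only [List.nil_append, PySem.Chars.splitOnMax.go]
      rw [if_neg (by decide), if_pos (by simp [List.isPrefixOf])]
      have : PySem.Chars.splitOnMax.go [':'] n 0 (List.drop 1 (':' :: v)) [] (cur.reverse :: acc)
          = ((List.reverse [] ++ v) :: cur.reverse :: acc).reverse := by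
        cases n with
        | zero => simp [PySem.Chars.splitOnMax.go]
        | succ m => cases v <;> simp [PySem.Chars.splitOnMax.go]
      simpa using this
  | cons c k ih =>
    intro fuel v cur acc hk hf
    cases fuel with
    | zero => simp at hf
    | succ n =>
      have hc : c ≠ ':' := fun h => hk (h ▸ List.mem_cons_self ..)
      simp only [List.cons_append, PySem.Chars.splitOnMax.go]
      rw [if_neg (by decide), if_neg (by simp [List.isPrefixOf]; exact fun h' => hc h'.symm)]
      rw [ih n v (c :: cur) acc (fun h => hk (List.mem_cons_of_mem _ h)) (by simp at hf ⊢; omega)]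
      simp

lemma splitMax_one (k v : List Char) (hk : ':' ∉ k) :
    PySem.Chars.splitMax? (k ++ ':' :: v) [':'] 1 = some [k, v] := by
  unfold PySem.Chars.splitMax? PySem.Chars.splitOnMax
  rw [if_neg (by decide), if_neg (by decide)]
  rw [show (1 : Int).toNat = 1 from rfl, goMax_one k _ v [] [] hk (by simp)]
  simp

lemma isIn_colon (part : List Char) : PySem.Chars.isIn [':'] part = true ↔ ':' ∈ part := by
  rw [PySem.Chars.isIn_iff_infix]
  constructor
  · rintro ⟨p, s, h⟩; subst h; simp
  · intro h
    obtain ⟨p, s, h⟩ := List.append_of_mem h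
    exact ⟨p, s, by simp [h]⟩

lemma cvss_shift (k v : List Char) (hk : ':' ∉ k) :
    PySem.Chars.startswith (k ++ ':' :: v) "CVSS".toList
      = PySem.Chars.startswith k "CVSS".toList := by
  rcases k with _ | ⟨a, _ | ⟨b, _ | ⟨c, _ | ⟨d, k⟩⟩⟩⟩ <;>
    simp only [PySem.Chars.startswith, List.nil_append, List.cons_append] <;>
    simp_all [List.isPrefixOf, Bool.and_comm, Bool.and_assoc]

lemma flushEq (d : PySem.Dict String String) (k v : List Char) (b : Bool)
    (hk : ':' ∉ k) : procPart d (partOf k v b) = pvFlush d k v b := by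
  cases b with
  | false =>
    rw [show partOf k v false = k from rfl]
    have : PySem.Chars.isIn [':'] k = false := by
      rw [Bool.eq_false_iff]; intro h; exact hk ((isIn_colon k).mp h)
    simp [procPart, pvFlush, this]
  | true =>
    rw [show partOf k v true = k ++ ':' :: v from rfl]
    have h1 : PySem.Chars.isIn [':'] (k ++ ':' :: v) = true :=
      (isIn_colon _).mpr (List.mem_append_right _ (List.mem_cons_self ..))
    unfold procPart pvFlush
    rw [cvss_shift k v hk, splitMax_one k v hk, h1]
    cases h : PySem.Chars.startswith k "CVSS".toList <;> simp

lemma mainInv (cs : List Char) : ∀ (d : PySem.Dict String String) (k v : List Char) (b : Bool),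
    ':' ∉ k → (b = false → v = []) →
    pvFlush (cs.foldl pvStep (d, k, v, b)).1 (cs.foldl pvStep (d, k, v, b)).2.1
        (cs.foldl pvStep (d, k, v, b)).2.2.1 (cs.foldl pvStep (d, k, v, b)).2.2.2
      = (mySplit (partOf k v b) cs).foldl procPart d := by
  induction cs with
  | nil =>
    intro d k v b hk hv
    simp only [List.foldl_nil, mySplit, List.foldl_cons, List.foldl_nil]
    exact (flushEq d k v b hk).symm
  | cons c rest ih =>
    intro d k v b hk hv
    simp only [List.foldl_cons]
    by_cases hc : c = '/'
    · subst hc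
      have hs : pvStep (d, k, v, b) '/' = (pvFlush d k v b, [], [], false) := by
        simp [pvStep]
      rw [hs, ih (pvFlush d k v b) [] [] false (by simp) (fun _ => rfl)]
      show List.foldl procPart (pvFlush d k v b) (mySplit [] rest)
          = List.foldl procPart d (mySplit (partOf k v b) ('/' :: rest))
      rw [show mySplit (partOf k v b) ('/' :: rest)
            = partOf k v b :: mySplit [] rest from by simp [mySplit]]
      rw [List.foldl_cons, flushEq d k v b hk]
    · by_cases hcol : c = ':' ∧ b = false
      · obtain ⟨hc1, hb⟩ := hcol
        subst hc1; subst hb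
        have hs : pvStep (d, k, v, false) ':' = (d, k, v, true) := by simp [pvStep, hc]
        rw [hs, ih d k v true hk (by simp)]
        have hv' : v = [] := hv rfl
        subst hv'
        simp [mySplit, hc, partOf]
      · cases b with
        | true =>
          have hs : pvStep (d, k, v, true) c = (d, k, v ++ [c], true) := by simp [pvStep, hc]
          rw [hs, ih d k (v ++ [c]) true hk (by simp)]
          simp [mySplit, hc, partOf]
        | false =>
          have hc2 : c ≠ ':' := fun h => hcol ⟨h, rfl⟩
          have hs : pvStep (d, k, v, false) c = (d, k ++ [c], v, false) := by simp [pvStep, hc, hc2]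
          rw [hs, ih d (k ++ [c]) v false (fun h => by
            rcases List.mem_append.mp h with h' | h'
            · exact hk h'
            · exact hc2 (List.mem_singleton.mp h').symm) hv]
          simp [mySplit, hc, partOf]

-- ===== VERDICT (by name: the statement is the Claim_ definition above) =====
theorem parse_cvss_metrics_spec : Claim_equal_parse_cvss_metrics := by
  intro s _
  unfold Spec_parse_cvss_metrics parse_cvss_metrics parse_cvss_metrics_alt
  by_cases h : s.toList = []
  · rw [if_pos h, h]
    simp [pvFlush, PySem.Dict.empty]
  · rw [if_neg h, splitOn_char]
    have h2 := mainInv s.toList PySem.Dict.empty [] [] false (by simp) (fun _ => rfl)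
    simp only [partOf] at h2
    exact congrArg PySem.Dict.items h2.symm
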